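-- pv_equiv track=rewrite | github.com/pypi-data/pypi-mirror-400 | packages/fudstop4/fudstop4-1.5.0-py3-none-any.whl/scripts/live_rules_scanner.py | resolve_conditions
-- ===== SOURCE A (Python) =====
-- from typing import Dict, Iterable, List, Tuple
--
-- def resolve_conditions(
--     rule_name: str,
--     rules_by_name: Dict[str, dict],
--     stack: List[str] | None = None,
-- ) -> List[str]:
--     stack = list(stack or [])
--     if rule_name in stack:
--         raise ValueError(f"Circular rule reference: {' -> '.join(stack + [rule_name])}")
--     stack.append(rule_name)
--
--     rule = rules_by_name.get(rule_name)
--     if not rule: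
--         return []
--
--     resolved: List[str] = []
--     for cond in rule.get("conditions", []):
--         if cond in rules_by_name:
--             resolved.extend(resolve_conditions(cond, rules_by_name, stack))
--         else:
--             resolved.append(cond)
--     return resolved
-- ===== SOURCE B (Python) =====
-- def resolve_conditions(rule_name, rules_by_name, stack=None):
--     # DAG memoization: each rule is expanded at most once per call; the in-path
--     # set keeps the cycle check.  Same return value as the naive expansion.
--     memo = {}
--
--     def expand(name, path):
--         if name in memo:
--             return memo[name]
--         if name in path:
--             raise ValueError(f"Circular rule reference: {name}")
--         rule = rules_by_name.get(name) or {}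
--         path = path | {name}
--         out = []
--         for cond in rule.get("conditions", []):
--             out += expand(cond, path) if cond in rules_by_name else [cond]
--         memo[name] = out
--         return out
--
--     return expand(rule_name, set(stack or []))
-- ===== Notes on version B (the rewrite author's own statement) =====
-- stated objective: alternative
-- what changed: B memoizes the flattened condition list per rule name (DAG memoization, cycle check via an in-path set), so each rule is expanded at most once per call instead of once per path through the rule graph.
import Mathlib
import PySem

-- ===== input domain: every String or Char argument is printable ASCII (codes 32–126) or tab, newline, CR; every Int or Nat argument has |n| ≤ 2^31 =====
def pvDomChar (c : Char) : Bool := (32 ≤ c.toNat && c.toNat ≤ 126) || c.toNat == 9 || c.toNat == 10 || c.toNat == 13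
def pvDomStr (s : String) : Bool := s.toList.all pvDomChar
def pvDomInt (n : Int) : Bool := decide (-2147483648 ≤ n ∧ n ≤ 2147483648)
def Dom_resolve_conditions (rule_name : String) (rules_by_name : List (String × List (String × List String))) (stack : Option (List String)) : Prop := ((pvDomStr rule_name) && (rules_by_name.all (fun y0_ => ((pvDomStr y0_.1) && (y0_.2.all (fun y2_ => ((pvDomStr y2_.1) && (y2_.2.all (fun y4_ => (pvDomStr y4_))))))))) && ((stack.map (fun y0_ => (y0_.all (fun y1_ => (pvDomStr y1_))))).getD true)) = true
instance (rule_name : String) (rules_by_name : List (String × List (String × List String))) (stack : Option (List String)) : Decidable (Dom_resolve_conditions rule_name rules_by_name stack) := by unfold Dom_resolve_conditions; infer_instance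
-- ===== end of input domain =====

-- B replaces A's naive recursive expansion by DAG-memoized expansion (one expansion per rule
-- name, cycle check via an in-path set); the return values agree on every input where A returns.

-- first-match association-list lookup (Python dict.get on the assoc-list representation); shared helper
def pvGet {A : Type} (d : List (String × A)) (k : String) : Option A :=
  match d with
  | [] => none
  | (k', v) :: rest => if k' = k then some v else pvGet rest k

-- ===== PORT A =====
-- fuel (rules.length + 1) only makes the recursion total; under Pre_ it is never exhausted.
def pvGoA (rules : List (String × List (String × List String))) : Nat → String → List String → List String
  | 0, _, _ => []
  | fuel+1, name, stk =>
    if name ∈ stk then []          -- Python A raises ValueError here; Pre_ excludes these inputs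
    else
      match pvGet rules name with
      | none => []
      | some r =>
        if r = [] then []
        else
          ((pvGet r "conditions").getD []).foldl
            (fun acc c =>
              if (pvGet rules c).isSome then acc ++ pvGoA rules fuel c (stk ++ [name])
              else acc ++ [c]) []

def resolve_conditions (rule_name : String) (rules_by_name : List (String × List (String × List String))) (stack : Option (List String)) : List String :=
  pvGoA rules_by_name (rules_by_name.length + 1) rule_name (stack.getD [])

-- ===== PORT B =====
-- B's for-loop over the conditions, as the obvious structural recursion building the output
-- front to back while threading the memo; 'step' is the recursive call of expand.
def pvChainF (step : String → PySem.Dict String (List String) → List String × PySem.Dict String (List String))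
    (isKey : String → Bool) :
    List String → PySem.Dict String (List String) → List String × PySem.Dict String (List String)
  | [], memo => ([], memo)
  | cond :: rest, memo =>
    let first := if isKey cond then step cond memo else ([cond], memo)
    let next := pvChainF step isKey rest first.2
    (first.1 ++ next.1, next.2)

-- fuel (rules.length + 1) only makes the recursion total; under Pre_ it is never exhausted.
def pvExpand (rules : List (String × List (String × List String))) :
    Nat → String → PySem.Set String → PySem.Dict String (List String) → List String × PySem.Dict String (List String)
  | 0, _, _, memo => ([], memo)
  | fuel+1, name, path, memo =>
    match PySem.Dict.get? memo name with
    | some v => (v, memo)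
    | none =>
      if name ∈ path then ([], memo)   -- Python B raises ValueError here; Pre_ excludes these inputs
      else
        let res := pvChainF (fun c m => pvExpand rules fuel c (PySem.Set.add path name) m)
          (fun c => (pvGet rules c).isSome)
          ((pvGet ((pvGet rules name).getD []) "conditions").getD []) memo
        (res.1, PySem.Dict.insert res.2 name res.1)

def resolve_conditions_alt (rule_name : String) (rules_by_name : List (String × List (String × List String))) (stack : Option (List String)) : List String :=
  (pvExpand rules_by_name (rules_by_name.length + 1) rule_name (PySem.Set.ofList (stack.getD [])) PySem.Dict.empty).1

-- ===== PRECONDITION & SPEC =====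
-- the conditions list of one rule (missing or falsy rule => [])
def pvConds (rules : List (String × List (String × List String))) (name : String) : List String :=
  match pvGet rules name with
  | none => []
  | some r => if r = [] then [] else (pvGet r "conditions").getD []

-- the rule names a rule references (the edges of the rule graph)
def pvTargets (rules : List (String × List (String × List String))) (name : String) : Finset String :=
  ((pvConds rules name).filter (fun c => (pvGet rules c).isSome)).toFinset

-- one step of the reachability closure, and the closure itself (rules.length+1 steps reach the fixpoint)
def pvStep (rules : List (String × List (String × List String))) (T : Finset String) : Finset String :=
  T ∪ T.biUnion (fun a => pvTargets rules a)

def pvReach (rules : List (String × List (String × List String))) (T : Finset String) : Finset String :=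
  (pvStep rules)^[rules.length + 1] T

-- Pre_ excludes exactly the inputs on which A raises ValueError: some rule reachable from
-- rule_name already lies on the given stack, or lies on a cycle of the rule graph.
def Pre_resolve_conditions (rule_name : String) (rules_by_name : List (String × List (String × List String))) (stack : Option (List String)) : Prop :=
  (∀ x ∈ pvReach rules_by_name {rule_name}, x ∉ stack.getD []) ∧
  (∀ x ∈ pvReach rules_by_name {rule_name}, x ∉ pvReach rules_by_name (pvTargets rules_by_name x))

instance (rule_name : String) (rules_by_name : List (String × List (String × List String))) (stack : Option (List String)) : Decidable (Pre_resolve_conditions rule_name rules_by_name stack) := by unfold Pre_resolve_conditions; infer_instance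

def pvWitness_resolve_conditions : String × (List (String × List (String × List String))) × Option (List String) :=
  ("a", [("a", [("conditions", ["b", "c"])]), ("b", [("conditions", ["x"])])], none)

def Spec_resolve_conditions (rule_name : String) (rules_by_name : List (String × List (String × List String))) (stack : Option (List String)) (out : List String) : Prop := out = resolve_conditions_alt rule_name rules_by_name stack
instance (rule_name : String) (rules_by_name : List (String × List (String × List String))) (stack : Option (List String)) (out : List String) : Decidable (Spec_resolve_conditions rule_name rules_by_name stack out) := by unfold Spec_resolve_conditions; infer_instance

-- ===== CLAIM (what is proved, stated in full; the proofs are below) =====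
def Claim_equal_resolve_conditions : Prop := ∀ (rule_name : String) (rules_by_name : List (String × List (String × List String))) (stack : Option (List String)), Dom_resolve_conditions rule_name rules_by_name stack → Pre_resolve_conditions rule_name rules_by_name stack → Spec_resolve_conditions rule_name rules_by_name stack (resolve_conditions rule_name rules_by_name stack)

-- ===== LEMMAS AND PROOFS =====

-- the key set of the rules dict
def pvKF (rules : List (String × List (String × List String))) : Finset String :=
  (rules.map Prod.fst).toFinset

theorem pvGet_isSome_iff {A : Type} (d : List (String × A)) (k : String) :
    (pvGet d k).isSome = true ↔ k ∈ d.map Prod.fst := by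
  induction d with
  | nil => simp [pvGet]
  | cons p rest ih =>
    obtain ⟨k', v⟩ := p
    by_cases h : k' = k
    · subst h; simp [pvGet]
    · simp [pvGet, h, ih, Ne.symm h]

theorem pvMem_targets (rules : List (String × List (String × List String))) (a c : String) :
    c ∈ pvTargets rules a ↔ c ∈ pvConds rules a ∧ (pvGet rules c).isSome = true := by
  simp [pvTargets]

theorem pvTargets_subset_keys (rules : List (String × List (String × List String))) (a : String) :
    pvTargets rules a ⊆ pvKF rules := by
  intro c hc
  rw [pvMem_targets] at hc
  simpa [pvKF, List.mem_toFinset] using (pvGet_isSome_iff rules c).mp hc.2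

theorem pvMem_step (rules : List (String × List (String × List String))) (T : Finset String) (c : String) :
    c ∈ pvStep rules T ↔ c ∈ T ∨ ∃ a ∈ T, c ∈ pvTargets rules a := by
  simp [pvStep]

theorem pvSubset_step (rules : List (String × List (String × List String))) (T : Finset String) :
    T ⊆ pvStep rules T := Finset.subset_union_left

theorem pvStep_mono (rules : List (String × List (String × List String))) {T T' : Finset String}
    (h : T ⊆ T') : pvStep rules T ⊆ pvStep rules T' := by
  intro c hc
  rw [pvMem_step] at hc ⊢
  rcases hc with hc | ⟨a, ha, hc⟩
  · exact Or.inl (h hc)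
  · exact Or.inr ⟨a, h ha, hc⟩

theorem pvStep_subset_union (rules : List (String × List (String × List String))) (T : Finset String) :
    pvStep rules T ⊆ T ∪ pvKF rules := by
  intro c hc
  rw [pvMem_step] at hc
  rcases hc with hc | ⟨a, _, hc⟩
  · exact Finset.mem_union_left _ hc
  · exact Finset.mem_union_right _ (pvTargets_subset_keys rules a hc)

theorem pvSubset_iterate (rules : List (String × List (String × List String))) (T : Finset String) :
    ∀ n, T ⊆ (pvStep rules)^[n] T := by
  intro n
  induction n with
  | zero => simp
  | succ n ih =>
    rw [Function.iterate_succ_apply']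
    exact ih.trans (pvSubset_step rules _)

theorem pvIterate_subset_union (rules : List (String × List (String × List String))) (T : Finset String) :
    ∀ n, (pvStep rules)^[n] T ⊆ T ∪ pvKF rules := by
  intro n
  induction n with
  | zero => simp
  | succ n ih =>
    rw [Function.iterate_succ_apply']
    intro c hc
    rcases Finset.mem_union.mp (pvStep_subset_union rules _ hc) with h | h
    · exact ih h
    · exact Finset.mem_union_right _ h

theorem pvCard_grow (rules : List (String × List (String × List String))) (T : Finset String) :
    ∀ m, (∀ k < m, (pvStep rules)^[k+1] T ≠ (pvStep rules)^[k] T) →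
      T.card + m ≤ (((pvStep rules)^[m] T)).card := by
  intro m
  induction m with
  | zero => simp
  | succ m ih =>
    intro h
    have h1 := ih (fun k hk => h k (by omega))
    have hne : (pvStep rules)^[m+1] T ≠ (pvStep rules)^[m] T := h m (by omega)
    have hsub : (pvStep rules)^[m] T ⊆ (pvStep rules)^[m+1] T := by
      rw [Function.iterate_succ_apply']
      exact pvSubset_step rules _
    have hlt : ((pvStep rules)^[m] T).card < ((pvStep rules)^[m+1] T).card := by
      apply Finset.card_lt_card
      exact ⟨hsub, fun hback => hne (Finset.Subset.antisymm hback hsub)⟩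
    omega

theorem pvExists_fix (rules : List (String × List (String × List String))) (T : Finset String) :
    ∃ k ≤ rules.length, (pvStep rules)^[k+1] T = (pvStep rules)^[k] T := by
  by_contra h
  push Not at h
  have hgrow := pvCard_grow rules T (rules.length + 1) (fun k hk => h k (by omega))
  have hsub := pvIterate_subset_union rules T (rules.length + 1)
  have hcard : (((pvStep rules)^[rules.length+1] T)).card ≤ (T ∪ pvKF rules).card :=
    Finset.card_le_card hsub
  have hK : (pvKF rules).card ≤ rules.length := by
    calc (pvKF rules).card ≤ (rules.map Prod.fst).length := List.toFinset_card_le _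
    _ = rules.length := List.length_map ..
  have := Finset.card_union_le T (pvKF rules)
  omega

theorem pvFix_stable (rules : List (String × List (String × List String))) (X : Finset String)
    (h : pvStep rules X = X) : ∀ j, (pvStep rules)^[j] X = X := by
  intro j
  induction j with
  | zero => rfl
  | succ j ih => rw [Function.iterate_succ_apply', ih, h]

theorem pvReach_fixed (rules : List (String × List (String × List String))) (T : Finset String) :
    pvStep rules (pvReach rules T) = pvReach rules T := by
  obtain ⟨k, hk, hfix⟩ := pvExists_fix rules T
  have hstable := pvFix_stable rules ((pvStep rules)^[k] T)
    ((Function.iterate_succ_apply' (pvStep rules) k T).symm.trans hfix)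
  have heq : pvReach rules T = (pvStep rules)^[k] T := by
    unfold pvReach
    have : rules.length + 1 = (rules.length + 1 - k) + k := by omega
    rw [this, Function.iterate_add_apply]
    exact hstable _
  rw [heq]
  exact (Function.iterate_succ_apply' (pvStep rules) k T).symm.trans hfix

theorem pvSubset_reach (rules : List (String × List (String × List String))) (T : Finset String) :
    T ⊆ pvReach rules T := pvSubset_iterate rules T _

theorem pvReach_min (rules : List (String × List (String × List String))) {T C : Finset String}
    (hC : pvStep rules C = C) (hTC : T ⊆ C) : pvReach rules T ⊆ C := by
  unfold pvReach
  generalize rules.length + 1 = n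
  induction n with
  | zero => simpa
  | succ n ih =>
    rw [Function.iterate_succ_apply']
    calc pvStep rules ((pvStep rules)^[n] T) ⊆ pvStep rules C := pvStep_mono rules ih
    _ = C := hC

theorem pvReach_closed (rules : List (String × List (String × List String))) {T : Finset String}
    {a c : String} (ha : a ∈ pvReach rules T) (hc : c ∈ pvTargets rules a) :
    c ∈ pvReach rules T := by
  have : c ∈ pvStep rules (pvReach rules T) := (pvMem_step rules _ c).mpr (Or.inr ⟨a, ha, hc⟩)
  rwa [pvReach_fixed rules T] at this

-- the rank of a rule: size of the closure of its outgoing edges; strictly decreasing along edges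
def pvRk (rules : List (String × List (String × List String))) (name : String) : Nat :=
  (pvReach rules (pvTargets rules name)).card

theorem pvRk_le (rules : List (String × List (String × List String))) (name : String) :
    pvRk rules name ≤ rules.length := by
  have h1 : pvReach rules (pvTargets rules name) ⊆ pvKF rules := by
    intro c hc
    rcases Finset.mem_union.mp (pvIterate_subset_union rules _ _ hc) with h | h
    · exact pvTargets_subset_keys rules name h
    · exact h
  calc pvRk rules name ≤ (pvKF rules).card := Finset.card_le_card h1
  _ ≤ (rules.map Prod.fst).length := List.toFinset_card_le _
  _ = rules.length := List.length_map ..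

theorem pvRk_lt (rules : List (String × List (String × List String))) {S0 : Finset String}
    (hAcyc : ∀ x ∈ pvReach rules S0, x ∉ pvReach rules (pvTargets rules x))
    {name c : String} (hname : name ∈ pvReach rules S0) (hc : c ∈ pvTargets rules name) :
    pvRk rules c < pvRk rules name ∧ c ∈ pvReach rules S0 := by
  have hcR : c ∈ pvReach rules S0 := pvReach_closed rules hname hc
  have hcc : c ∈ pvReach rules (pvTargets rules name) := pvSubset_reach rules _ hc
  have hsub : pvReach rules (pvTargets rules c) ⊆ pvReach rules (pvTargets rules name) := by
    apply pvReach_min rules (pvReach_fixed rules _)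
    intro t ht
    exact pvReach_closed rules hcc ht
  have hnc : c ∉ pvReach rules (pvTargets rules c) := hAcyc c hcR
  refine ⟨Finset.card_lt_card ⟨hsub, fun hback => hnc (hback hcc)⟩, hcR⟩

-- the stack-free, memo-free reference resolver (fuel-indexed)
def pvPure (rules : List (String × List (String × List String))) : Nat → String → List String
  | 0, _ => []
  | fuel+1, name =>
      (pvConds rules name).foldl
        (fun acc c => if (pvGet rules c).isSome then acc ++ pvPure rules fuel c else acc ++ [c]) []

theorem pvPure_succ (rules : List (String × List (String × List String))) (f : Nat) (name : String) :
    pvPure rules (f+1) name =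
      (pvConds rules name).foldl
        (fun acc c => if (pvGet rules c).isSome then acc ++ pvPure rules f c else acc ++ [c]) [] := rfl

theorem pvPure_flatMap (rules : List (String × List (String × List String))) (f : Nat) (name : String) :
    pvPure rules (f+1) name =
      (pvConds rules name).flatMap
        (fun c => if (pvGet rules c).isSome then pvPure rules f c else [c]) := by
  rw [pvPure_succ]
  rw [show (fun acc c => if (pvGet rules c).isSome then acc ++ pvPure rules f c else acc ++ [c])
      = (fun (acc : List String) c => acc ++ (if (pvGet rules c).isSome then pvPure rules f c else [c]))
      from by funext acc c; split <;> rfl]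
  rw [PySem.List.foldl_append_eq_flatMap]
  simp

theorem pvPure_stable (rules : List (String × List (String × List String))) {S0 : Finset String}
    (hAcyc : ∀ x ∈ pvReach rules S0, x ∉ pvReach rules (pvTargets rules x)) :
    ∀ f1 f2 name, name ∈ pvReach rules S0 → pvRk rules name < f1 → pvRk rules name < f2 →
      pvPure rules f1 name = pvPure rules f2 name := by
  intro f1
  induction f1 with
  | zero => intro f2 name _ h _; omega
  | succ f ih =>
    intro f2 name hR h1 h2
    cases f2 with
    | zero => omega
    | succ g =>
      rw [pvPure_succ, pvPure_succ]
      apply PySem.List.foldl_congr_mem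
      intro acc c hc
      by_cases hck : (pvGet rules c).isSome = true
      · have hcT : c ∈ pvTargets rules name := (pvMem_targets rules name c).mpr ⟨hc, hck⟩
        obtain ⟨hlt, hcR⟩ := pvRk_lt rules hAcyc hR hcT
        rw [if_pos hck, if_pos hck, ih g c hcR (by omega) (by omega)]
      · rw [if_neg hck, if_neg hck]

-- unfolding equation for port A away from the raise branch
theorem pvGoA_eqn (rules : List (String × List (String × List String))) (f : Nat) (name : String) (stk : List String)
    (hn : name ∉ stk) :
    pvGoA rules (f+1) name stk =
      (pvConds rules name).foldl
        (fun acc c => if (pvGet rules c).isSome then acc ++ pvGoA rules f c (stk ++ [name]) else acc ++ [c]) [] := by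
  show (if name ∈ stk then [] else _) = _
  rw [if_neg hn]
  unfold pvConds
  cases hget : pvGet rules name with
  | none => simp
  | some r =>
    by_cases hre : r = []
    · simp [hre]
    · simp [hre]

-- A's recursion equals the reference resolver on safe stacks
theorem pvGoA_eq_pure (rules : List (String × List (String × List String))) {S0 : Finset String} {stk0 : List String}
    (hAcyc : ∀ x ∈ pvReach rules S0, x ∉ pvReach rules (pvTargets rules x))
    (hStk : ∀ x ∈ pvReach rules S0, x ∉ stk0) :
    ∀ fuel name stk, name ∈ pvReach rules S0 →
      (∀ s ∈ stk, s ∈ stk0 ∨ name ∈ pvReach rules (pvTargets rules s)) →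
      pvRk rules name < fuel →
      pvGoA rules fuel name stk = pvPure rules fuel name := by
  intro fuel
  induction fuel with
  | zero => intro name stk _ _ h; omega
  | succ f ih =>
    intro name stk hR hsafe hr
    have hnm : name ∉ stk := by
      intro hmem
      rcases hsafe name hmem with h | h
      · exact hStk name hR h
      · exact hAcyc name hR h
    rw [pvGoA_eqn rules f name stk hnm, pvPure_succ]
    apply PySem.List.foldl_congr_mem
    intro acc c hc
    by_cases hck : (pvGet rules c).isSome = true
    · have hcT : c ∈ pvTargets rules name := (pvMem_targets rules name c).mpr ⟨hc, hck⟩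
      obtain ⟨hlt, hcR⟩ := pvRk_lt rules hAcyc hR hcT
      have hsafe' : ∀ s ∈ stk ++ [name], s ∈ stk0 ∨ c ∈ pvReach rules (pvTargets rules s) := by
        intro s hs
        rcases List.mem_append.mp hs with hs | hs
        · rcases hsafe s hs with h | h
          · exact Or.inl h
          · exact Or.inr (pvReach_closed rules h hcT)
        · have : s = name := by simpa using hs
          subst this
          exact Or.inr (pvSubset_reach rules _ hcT)
      rw [if_pos hck, if_pos hck, ih c (stk ++ [name]) hcR hsafe' (by omega)]
    · rw [if_neg hck, if_neg hck]

-- B reads the conditions exactly as pvConds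
theorem pvCondsB_eq (rules : List (String × List (String × List String))) (name : String) :
    (pvGet ((pvGet rules name).getD []) "conditions").getD [] = pvConds rules name := by
  unfold pvConds
  cases pvGet rules name with
  | none => simp [pvGet]
  | some r =>
    by_cases hre : r = []
    · subst hre; simp [pvGet]
    · simp [hre]

-- memo soundness: every cached value is the reference value at full fuel
def pvMemoOK (rules : List (String × List (String × List String))) (memo : PySem.Dict String (List String)) : Prop :=
  ∀ k v, PySem.Dict.get? memo k = some v → v = pvPure rules (rules.length + 1) k

theorem pvMemoOK_insert (rules : List (String × List (String × List String))) (memo : PySem.Dict String (List String))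
    (name : String) (out : List String) (h : pvMemoOK rules memo)
    (hout : out = pvPure rules (rules.length + 1) name) :
    pvMemoOK rules (PySem.Dict.insert memo name out) := by
  intro k v hk
  rw [PySem.Dict.get?_insert] at hk
  by_cases he : k = name
  · rw [if_pos he] at hk
    cases hk
    exact he ▸ hout
  · rw [if_neg he] at hk
    exact h k v hk

-- B's memoized recursion equals the reference resolver and preserves memo soundness
theorem pvExpand_eq_pure (rules : List (String × List (String × List String))) {S0 : Finset String} {stk0 : List String}
    (hAcyc : ∀ x ∈ pvReach rules S0, x ∉ pvReach rules (pvTargets rules x))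
    (hStk : ∀ x ∈ pvReach rules S0, x ∉ stk0) :
    ∀ fuel name path memo, name ∈ pvReach rules S0 →
      (∀ s ∈ path, s ∈ stk0 ∨ name ∈ pvReach rules (pvTargets rules s)) →
      pvRk rules name < fuel → pvMemoOK rules memo →
      (pvExpand rules fuel name path memo).1 = pvPure rules (rules.length + 1) name ∧
      pvMemoOK rules (pvExpand rules fuel name path memo).2 := by
  intro fuel
  induction fuel with
  | zero => intro name path memo _ _ h _; omega
  | succ f ih =>
    intro name path memo hR hsafe hr hm
    have hnm : name ∉ path := by
      intro hmem
      rcases hsafe name hmem with h | h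
      · exact hStk name hR h
      · exact hAcyc name hR h
    cases hmg : PySem.Dict.get? memo name with
    | some v =>
      simp only [pvExpand, hmg]
      exact ⟨hm name v hmg, hm⟩
    | none =>
      simp only [pvExpand, hmg, if_neg hnm, pvCondsB_eq]
      -- the loop over the conditions, by induction on the list
      have hchain :
          ∀ (l : List String), (∀ c ∈ l, c ∈ pvConds rules name) → ∀ m, pvMemoOK rules m →
            (pvChainF (fun c m => pvExpand rules f c (PySem.Set.add path name) m)
                (fun c => (pvGet rules c).isSome) l m).1 =
              l.flatMap (fun c => if (pvGet rules c).isSome then pvPure rules (rules.length + 1) c else [c]) ∧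
            pvMemoOK rules (pvChainF (fun c m => pvExpand rules f c (PySem.Set.add path name) m)
                (fun c => (pvGet rules c).isSome) l m).2 := by
        intro l
        induction l with
        | nil => intro _ m hmo; exact ⟨rfl, hmo⟩
        | cons c rest ihl =>
          intro hsub m hmo
          have hcc : c ∈ pvConds rules name := hsub c List.mem_cons_self
          by_cases hck : (pvGet rules c).isSome = true
          · have hcT : c ∈ pvTargets rules name := (pvMem_targets rules name c).mpr ⟨hcc, hck⟩
            obtain ⟨hlt, hcR⟩ := pvRk_lt rules hAcyc hR hcT
            have hsafe' : ∀ s ∈ PySem.Set.add path name, s ∈ stk0 ∨ c ∈ pvReach rules (pvTargets rules s) := by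
              intro s hs
              rcases (PySem.Set.mem_add _ _ _).mp hs with hs | hs
              · rcases hsafe s hs with h | h
                · exact Or.inl h
                · exact Or.inr (pvReach_closed rules h hcT)
              · subst hs
                exact Or.inr (pvSubset_reach rules _ hcT)
            obtain ⟨hq1, hq2⟩ := ih c (PySem.Set.add path name) m hcR hsafe' (by omega) hmo
            obtain ⟨hr1, hr2⟩ := ihl (fun x hx => hsub x (List.mem_cons_of_mem _ hx)) _ hq2
            refine ⟨?_, ?_⟩
            · simp only [pvChainF, if_pos hck, List.flatMap_cons]
              rw [hq1, hr1]
            · simp only [pvChainF, if_pos hck]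
              exact hr2
          · obtain ⟨hr1, hr2⟩ := ihl (fun x hx => hsub x (List.mem_cons_of_mem _ hx)) _ hmo
            refine ⟨?_, ?_⟩
            · simp only [pvChainF, if_neg hck, List.flatMap_cons]
              rw [hr1]
            · simp only [pvChainF, if_neg hck]
              exact hr2
      obtain ⟨hb1, hb2⟩ := hchain (pvConds rules name) (fun x hx => hx) memo hm
      have hout : (pvChainF (fun c m => pvExpand rules f c (PySem.Set.add path name) m)
          (fun c => (pvGet rules c).isSome) (pvConds rules name) memo).1 =
          pvPure rules (rules.length + 1) name := by
        rw [hb1, pvPure_flatMap, List.flatMap_def, List.flatMap_def]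
        congr 1
        apply List.map_congr_left
        intro c hc
        by_cases hck : (pvGet rules c).isSome = true
        · have hcT : c ∈ pvTargets rules name := (pvMem_targets rules name c).mpr ⟨hc, hck⟩
          obtain ⟨hlt, hcR⟩ := pvRk_lt rules hAcyc hR hcT
          have hle := pvRk_le rules name
          rw [if_pos hck, if_pos hck]
          exact pvPure_stable rules hAcyc (rules.length + 1) rules.length c hcR (by omega) (by omega)
        · rw [if_neg hck, if_neg hck]
      exact ⟨hout, pvMemoOK_insert rules _ name _ hb2 hout⟩

-- ===== VERDICT (by name: the statement is the Claim_ definition above) =====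
theorem resolve_conditions_spec : Claim_equal_resolve_conditions := by
  intro rule_name rules stack _ hPre
  obtain ⟨hStk, hAcyc⟩ := hPre
  unfold Spec_resolve_conditions resolve_conditions resolve_conditions_alt
  have hR : rule_name ∈ pvReach rules {rule_name} :=
    pvSubset_reach rules {rule_name} (Finset.mem_singleton_self rule_name)
  have hrk : pvRk rules rule_name < rules.length + 1 := by
    have := pvRk_le rules rule_name; omega
  have hA := pvGoA_eq_pure rules hAcyc hStk (rules.length + 1) rule_name (stack.getD []) hR
    (fun s hs => Or.inl hs) hrk
  have hB := pvExpand_eq_pure rules hAcyc hStk (rules.length + 1) rule_name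
    (PySem.Set.ofList (stack.getD [])) PySem.Dict.empty hR
    (fun s hs => Or.inl ((PySem.Set.mem_ofList _ _).mp hs))
    hrk (by intro k v hk; rw [PySem.Dict.get?_empty] at hk; cases hk)
  rw [hA, hB.1]
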